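-- pv_equiv track=rewrite | github.com/posl/comment_recommendation | script/mod_gen/2_time/en/118_D/6.py | solve
-- ===== SOURCE A (Python) =====
-- def solve(n, m, a):
--     dp = [-1] * (n + 1)
--     dp[0] = 0
--     for i in range(n + 1):
--         for j in range(m):
--             if i >= a[j][1] and dp[i - a[j][1]] != -1:
--                 dp[i] = max(dp[i], dp[i - a[j][1]] * 10 + a[j][0])
--     return dp[n]
-- ===== SOURCE B (Python) =====
-- def solve(n, m, a):
--     # Demand-driven top-down evaluation: only states reachable from n are visited;
--     # memoized recursion is run with an explicit DFS stack (post-order), so no call depth.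
--     opts = [a[j] for j in range(m)]
--     memo = {0: 0}
--     stack = [(n, False)]
--     while stack:
--         i, expanded = stack.pop()
--         if i in memo:
--             continue
--         if expanded:
--             best = -1
--             for d, c in opts:
--                 if 1 <= c <= i:
--                     r = memo[i - c]
--                     if r != -1:
--                         best = max(best, r * 10 + d)
--             memo[i] = best
--         else:
--             stack.append((i, True))
--             for d, c in opts:
--                 j = i - c
--                 if 1 <= c <= i and j not in memo:
--                     stack.append((j, False))
--     return memo.get(n, -1)
-- ===== Notes on version B (the rewrite author's own statement) =====
-- stated objective: alternative
-- what changed: Replaces A's bottom-up dense table sweep over all cells 0..n by a demand-driven top-down memoized evaluation: an explicit DFS stack expands only the states reachable from n, computing each in post-order into a memo dict.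
-- outside the precondition, e.g. on solve(1, 2, [(1, 0), (2, 1)]): A returns 12, B returns 2
import Mathlib
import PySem

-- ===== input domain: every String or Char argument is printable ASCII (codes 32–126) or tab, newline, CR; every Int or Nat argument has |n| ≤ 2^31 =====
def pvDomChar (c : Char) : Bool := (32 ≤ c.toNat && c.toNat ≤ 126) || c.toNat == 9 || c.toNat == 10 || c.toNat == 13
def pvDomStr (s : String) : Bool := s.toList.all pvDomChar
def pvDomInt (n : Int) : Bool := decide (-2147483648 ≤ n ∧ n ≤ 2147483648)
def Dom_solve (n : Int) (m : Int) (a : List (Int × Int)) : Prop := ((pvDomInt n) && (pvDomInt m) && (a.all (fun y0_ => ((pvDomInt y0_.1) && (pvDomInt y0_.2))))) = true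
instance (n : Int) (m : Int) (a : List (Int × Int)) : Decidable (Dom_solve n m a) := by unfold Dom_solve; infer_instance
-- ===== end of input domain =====

-- B replaces A's bottom-up dense sweep over all cells 0..n by a demand-driven top-down
-- memoized evaluation (explicit DFS stack, post-order) that visits only states reachable
-- from n (objective: alternative).

-- ===== PORT A =====
def solve (n : Int) (m : Int) (a : List (Int × Int)) : Int :=
  let dp0 : List Int :=
    PySem.List.pySetD (List.replicate (n + 1).toNat (-1 : Int)) 0 0    -- dp = [-1]*(n+1); dp[0] = 0
  let dp :=
    (PySem.List.pyRange 0 (n + 1) 1).foldl (fun dp i =>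
      (PySem.List.pyRange 0 m 1).foldl (fun dp j =>
        let aj := PySem.List.pyGetD a j (0, 0)
        if aj.2 ≤ i ∧ PySem.List.pyGetD dp (i - aj.2) 0 ≠ -1 then
          PySem.List.pySetD dp i
            (max (PySem.List.pyGetD dp i 0) (PySem.List.pyGetD dp (i - aj.2) 0 * 10 + aj.1))
        else dp) dp) dp0
  PySem.List.pyGetD dp n 0

-- ===== PORT B =====
-- the deps of state i still missing from the memo, pushed by the expansion step (Source B's inner 'for' of the else-branch)
def pvMissing (opts : List (Int × Int)) (memo : PySem.Dict Int Int) (i : Int) : List (Int × Bool) :=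
  opts.filterMap (fun dc =>
    if 1 ≤ dc.2 ∧ dc.2 ≤ i ∧ PySem.Dict.get? memo (i - dc.2) = none then some (i - dc.2, false) else none)

-- Source B's compute step ('best' accumulator); memo[i - c] is rendered total as getD (-1):
-- pvLoopF only reaches this branch with every read key present (proved in pvLoopF_main below)
def pvBest (opts : List (Int × Int)) (memo : PySem.Dict Int Int) (i : Int) : Int :=
  opts.foldl (fun best dc =>
    if 1 ≤ dc.2 ∧ dc.2 ≤ i then
      (if PySem.Dict.getD memo (i - dc.2) (-1) ≠ -1 then
        max best (PySem.Dict.getD memo (i - dc.2) (-1) * 10 + dc.1) else best)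
    else best) (-1)

-- termination measure for the while loop: uncomputed stack entries weigh K^(#uncomputed states ≤ e)
def pvUncomp (memo : PySem.Dict Int Int) (i : Int) : Nat :=
  (List.filter (fun k : Nat => (PySem.Dict.get? memo (k : Int)).isNone) (List.range (i + 1).toNat)).length

def pvWt (K : Nat) (memo : PySem.Dict Int Int) (e : Int × Bool) : Nat :=
  if (PySem.Dict.get? memo e.1).isSome then 1
  else if e.2 then K ^ pvUncomp memo e.1 + 1 else 2 * K ^ pvUncomp memo e.1 + 1

def pvMeasure (K : Nat) (memo : PySem.Dict Int Int) (stack : List (Int × Bool)) : Nat :=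
  (stack.map (pvWt K memo)).sum

def pvLoopF (opts : List (Int × Int)) : Nat → List (Int × Bool) → PySem.Dict Int Int → PySem.Dict Int Int
  | 0, _, memo => memo
  | fuel + 1, stack, memo =>
    match stack with
    | [] => memo
    | (i, exp) :: rest =>
      if (PySem.Dict.get? memo i).isSome then
        pvLoopF opts fuel rest memo
      else if exp then
        pvLoopF opts fuel rest (memo.insert i (pvBest opts memo i))
      else
        pvLoopF opts fuel ((pvMissing opts memo i).reverse ++ (i, true) :: rest) memo

def solve_alt (n : Int) (m : Int) (a : List (Int × Int)) : Int :=
  let opts := (PySem.List.pyRange 0 m 1).map (fun j => PySem.List.pyGetD a j (0, 0))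
  let stack0 : List (Int × Bool) := [(n, false)]
  let memo0 := PySem.Dict.ofList [((0 : Int), (0 : Int))]
  -- the while loop, rendered total with a fuel bound one above its termination measure
  -- (pvLoopF_main below proves the fuel is never exhausted: the loop ends on its own)
  let memo := pvLoopF opts (pvMeasure (3 * opts.length + 4) memo0 stack0 + 1) stack0 memo0
  PySem.Dict.getD memo n (-1)

-- ===== PRECONDITION & SPEC =====
-- Pre_ excludes negative n and m > len(a), on which A raises IndexError; negative stick
-- costs among the first m digit options, on which A raises IndexError at i = n; and
-- zero stick costs, where A's returned value is an accident of its in-place same-cell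
-- update order during the inner loop.
def Pre_solve (n : Int) (m : Int) (a : List (Int × Int)) : Prop :=
  0 ≤ n ∧ m ≤ (a.length : Int) ∧ ∀ dc ∈ a.take m.toNat, 1 ≤ dc.2
instance (n : Int) (m : Int) (a : List (Int × Int)) : Decidable (Pre_solve n m a) := by
  unfold Pre_solve; infer_instance
def pvWitness_solve : Int × Int × (List (Int × Int)) := (7, 2, [(7, 2), (1, 3)])

def Spec_solve (n : Int) (m : Int) (a : List (Int × Int)) (out : Int) : Prop := out = solve_alt n m a
instance (n : Int) (m : Int) (a : List (Int × Int)) (out : Int) : Decidable (Spec_solve n m a out) := by unfold Spec_solve; infer_instance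

-- ===== CLAIM (what is proved, stated in full; the proofs are below) =====
def Claim_equal_solve : Prop := ∀ (n : Int) (m : Int) (a : List (Int × Int)), Dom_solve n m a → Pre_solve n m a → Spec_solve n m a (solve n m a)

-- ===== LEMMAS AND PROOFS =====

-- the first m options, as a plain list (both ports read a[j] for j in range(m))
def pvOpts (m : Int) (a : List (Int × Int)) : List (Int × Int) := a.take m.toNat

-- the reference table: pvTbl opts q lists the best value buildable with exactly
-- 0, 1, …, q sticks (-1 = unreachable), built by the pull recurrence.
def pvStepAcc (T : List Int) (acc : Int) (dc : Int × Int) : Int :=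
  if dc.2 ≤ (T.length : Int) ∧ T.getD ((T.length : Int) - dc.2).toNat 0 ≠ -1 then
    max acc (T.getD ((T.length : Int) - dc.2).toNat 0 * 10 + dc.1)
  else acc

def pvTbl (opts : List (Int × Int)) : Nat → List Int
  | 0 => [0]
  | k + 1 => pvTbl opts k ++ [opts.foldl (pvStepAcc (pvTbl opts k)) (-1)]

def pvF (opts : List (Int × Int)) (q : Nat) : Int := (pvTbl opts q).getD q 0

-- pvF extended to Int arguments (-1 below zero), the value every memo entry carries
def pvFI (opts : List (Int × Int)) (i : Int) : Int := if 0 ≤ i then pvF opts i.toNat else -1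

theorem pv_opts_map (m : Int) (a : List (Int × Int)) (hm : m ≤ (a.length : Int)) :
    (PySem.List.pyRange 0 m 1).map (fun j => PySem.List.pyGetD a j (0, 0)) = pvOpts m a := by
  rcases (show 0 ≤ m ∨ m < 0 by omega) with h0 | h0
  · obtain ⟨k, rfl⟩ : ∃ k : Nat, m = (k : Int) := ⟨m.toNat, (Int.toNat_of_nonneg h0).symm⟩
    have hk : k ≤ a.length := by exact_mod_cast hm
    unfold pvOpts
    rw [Int.toNat_natCast]
    induction k with
    | zero => simp [PySem.List.pyRange_one_eq_nil]
    | succ k ih =>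
      have hk' : k ≤ a.length := Nat.le_of_succ_le hk
      rw [show ((k+1 : Nat) : Int) = (k : Int) + 1 by push_cast; ring,
        PySem.List.pyRange_one_succ_right (by positivity), List.map_append,
        ih (by exact_mod_cast hk') (by positivity) hk']
      rw [List.take_succ_eq_append_getElem hk]
      simp [PySem.List.pyGetD_natCast, List.getD_eq_getElem?_getD,
        List.getElem?_eq_getElem hk]
  · rw [PySem.List.pyRange_one_eq_nil (by omega)]
    unfold pvOpts
    rw [show m.toNat = 0 by omega]
    simp

theorem pv_length_tbl (opts : List (Int × Int)) (k : Nat) : (pvTbl opts k).length = k + 1 := by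
  induction k with
  | zero => rfl
  | succ k ih => simp [pvTbl, ih]

theorem pvF_prefix (opts : List (Int × Int)) (k j : Nat) (hj : j ≤ k) :
    (pvTbl opts k).getD j 0 = pvF opts j := by
  induction k with
  | zero =>
    interval_cases j
    rfl
  | succ k ih =>
    rcases (show j ≤ k ∨ j = k + 1 by omega) with h | rfl
    · rw [pvTbl, List.getD_append _ _ _ _ (by rw [pv_length_tbl]; omega), ih h]
    · rfl

-- ---- A-side: the dense sweep fills the table ----

def pvAin (i : Int) (dp : List Int) (dc : Int × Int) : List Int :=
  if dc.2 ≤ i ∧ PySem.List.pyGetD dp (i - dc.2) 0 ≠ -1 then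
    PySem.List.pySetD dp i
      (max (PySem.List.pyGetD dp i 0) (PySem.List.pyGetD dp (i - dc.2) 0 * 10 + dc.1))
  else dp

def pvAbody (opts : List (Int × Int)) (dp : List Int) (i : Int) : List Int :=
  opts.foldl (pvAin i) dp

theorem pv_ainner (T : List Int) (os : List (Int × Int)) (hc : ∀ dc ∈ os, 1 ≤ dc.2)
    (acc : Int) (rest : List Int) :
    os.foldl (pvAin (T.length : Int)) (T ++ acc :: rest) =
      T ++ (os.foldl (pvStepAcc T) acc) :: rest := by
  induction os generalizing acc with
  | nil => rfl
  | cons dc os ih =>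
    have hc1 : 1 ≤ dc.2 := hc dc (List.mem_cons_self)
    have hc' : ∀ d ∈ os, 1 ≤ d.2 := fun d hd => hc d (List.mem_cons_of_mem _ hd)
    rw [List.foldl_cons, List.foldl_cons]
    have key : pvAin (T.length : Int) (T ++ acc :: rest) dc = T ++ (pvStepAcc T acc dc) :: rest := by
      have hgi : PySem.List.pyGetD (T ++ acc :: rest) (T.length : Int) 0 = acc := by
        rw [PySem.List.pyGetD_natCast, List.getD_append_right _ _ _ _ (le_refl _)]
        simp
      unfold pvAin pvStepAcc
      by_cases hcle : dc.2 ≤ (T.length : Int)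
      · have hlt : ((T.length : Int) - dc.2).toNat < T.length := by omega
        have hgd : PySem.List.pyGetD (T ++ acc :: rest) ((T.length : Int) - dc.2) 0 =
            T.getD ((T.length : Int) - dc.2).toNat 0 := by
          rw [PySem.List.pyGetD_of_nonneg _ _ (by omega), List.getD_append _ _ _ _ hlt]
        rw [hgd, hgi]
        by_cases hne : T.getD ((T.length : Int) - dc.2).toNat 0 ≠ -1
        · rw [if_pos ⟨hcle, hne⟩, if_pos ⟨hcle, hne⟩, PySem.List.pySetD_natCast]
          simp
        · rw [if_neg (by tauto), if_neg (by tauto)]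
      · rw [if_neg (by tauto), if_neg (by tauto)]
    rw [key]
    exact ih hc' _

theorem pv_ainv (n : Int) (opts : List (Int × Int)) (hc : ∀ dc ∈ opts, 1 ≤ dc.2)
    (p : Nat) (hp : p ≤ n.toNat) :
    (PySem.List.pyRange 0 ((p : Int) + 1) 1).foldl (pvAbody opts)
        ((0 : Int) :: List.replicate n.toNat (-1)) =
      pvTbl opts p ++ List.replicate (n.toNat - p) (-1) := by
  induction p with
  | zero =>
    simp only [Nat.cast_zero, zero_add]
    rw [show PySem.List.pyRange 0 1 1 = [(0 : Int)] from by decide]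
    rw [List.foldl_cons, List.foldl_nil]
    unfold pvAbody
    rw [PySem.List.foldl_congr_mem opts (pvAin 0) (fun acc _ => acc) _
      (fun acc dc hdc => by
        unfold pvAin
        rw [if_neg]
        rintro ⟨h1, -⟩
        have := hc dc hdc
        omega)]
    rw [PySem.List.foldl_ignore]
    simp [pvTbl]
  | succ p ih =>
    have hp' : p ≤ n.toNat := Nat.le_of_succ_le hp
    rw [show ((p + 1 : Nat) : Int) + 1 = ((p : Int) + 1) + 1 by push_cast; ring,
      PySem.List.pyRange_one_succ_right (by positivity), List.foldl_append, ih hp']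
    rw [List.foldl_cons, List.foldl_nil]
    rw [show List.replicate (n.toNat - p) (-1 : Int) =
        -1 :: List.replicate (n.toNat - (p + 1)) (-1) from by
      rw [show n.toNat - p = (n.toNat - (p + 1)) + 1 by omega]; rfl]
    unfold pvAbody
    rw [show ((p : Int) + 1) = ((pvTbl opts p).length : Int) from by
      rw [pv_length_tbl]; push_cast; ring]
    rw [pv_ainner (pvTbl opts p) opts hc (-1) _]
    rw [show pvTbl opts (p + 1) =
        pvTbl opts p ++ [opts.foldl (pvStepAcc (pvTbl opts p)) (-1)] from rfl]
    simp

theorem pv_solve_eq (n m : Int) (a : List (Int × Int)) (h : Pre_solve n m a) :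
    solve n m a = pvF (pvOpts m a) n.toNat := by
  obtain ⟨hn, hm, hcost⟩ := h
  have hopts : ∀ dc ∈ pvOpts m a, 1 ≤ dc.2 := hcost
  obtain ⟨N, rfl⟩ : ∃ N : Nat, n = (N : Int) := ⟨n.toNat, by omega⟩
  simp only [Int.toNat_natCast]
  have hfun : (fun (dp : List Int) (i : Int) =>
      (PySem.List.pyRange 0 m 1).foldl
        (fun dp j => pvAin i dp (PySem.List.pyGetD a j (0, 0))) dp) =
      pvAbody (pvOpts m a) := by
    funext dp i
    rw [← List.foldl_map (f := fun j => PySem.List.pyGetD a j (0, 0)) (g := pvAin i),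
      pv_opts_map m a hm]
    rfl
  have hdp0 : PySem.List.pySetD (List.replicate ((N : Int) + 1).toNat (-1 : Int)) 0 0 =
      (0 : Int) :: List.replicate N (-1) := by
    rw [show ((N : Int) + 1).toNat = N + 1 by omega, List.replicate_succ,
      PySem.List.pySetD_of_nonneg _ _ (le_refl 0)]
    simp
  show PySem.List.pyGetD
      ((PySem.List.pyRange 0 ((N : Int) + 1) 1).foldl
        (fun dp i => (PySem.List.pyRange 0 m 1).foldl
          (fun dp j => pvAin i dp (PySem.List.pyGetD a j (0, 0))) dp)
        (PySem.List.pySetD (List.replicate ((N : Int) + 1).toNat (-1 : Int)) 0 0)) (N : Int) 0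
      = pvF (pvOpts m a) N
  rw [hfun, hdp0]
  have hAB := pv_ainv ((N : Int)) (pvOpts m a) hopts N (by simp)
  simp only [Int.toNat_natCast] at hAB
  rw [hAB, Nat.sub_self, List.replicate_zero, List.append_nil, PySem.List.pyGetD_natCast]
  rfl

-- ---- B-side: the demand-driven DFS computes the same values ----

-- memo invariant: 0 is present, and every present key carries its pvFI value
def pvInv (opts : List (Int × Int)) (memo : PySem.Dict Int Int) : Prop :=
  (PySem.Dict.get? memo (0 : Int)).isSome ∧
  ∀ k v, PySem.Dict.get? memo k = some v → v = pvFI opts k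

-- stack well-formedness: each expanded entry finds all its deps either already in the
-- memo or among the entries above it
def pvWFs (opts : List (Int × Int)) (stack : List (Int × Bool)) (S : Int → Prop) : Prop :=
  match stack with
  | [] => True
  | (i, ph) :: rest =>
    (ph = true → ∀ dc ∈ opts, 1 ≤ dc.2 → dc.2 ≤ i → S (i - dc.2)) ∧
    pvWFs opts rest (fun k => S k ∨ k = i)

theorem pvWFs_mono (opts : List (Int × Int)) (stack : List (Int × Bool)) (S S' : Int → Prop)
    (h : ∀ k, S k → S' k) (hw : pvWFs opts stack S) : pvWFs opts stack S' := by
  induction stack generalizing S S' with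
  | nil => trivial
  | cons e rest ih =>
    obtain ⟨i, ph⟩ := e
    obtain ⟨h1, h2⟩ := hw
    exact ⟨fun hph dc hdc hc1 hc2 => h _ (h1 hph dc hdc hc1 hc2),
      ih _ _ (fun k hk => hk.elim (fun hs => Or.inl (h k hs)) Or.inr) h2⟩

theorem pvWFs_append_false (opts : List (Int × Int)) (xs ys : List (Int × Bool)) (S : Int → Prop)
    (hx : ∀ e ∈ xs, e.2 = false)
    (hw : pvWFs opts ys (fun k => S k ∨ ∃ e ∈ xs, e.1 = k)) : pvWFs opts (xs ++ ys) S := by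
  induction xs generalizing S with
  | nil =>
    rw [List.nil_append]
    exact pvWFs_mono opts ys _ S (fun k hk => by tauto) (by simpa using hw)
  | cons x xs ih =>
    obtain ⟨d, ph⟩ := x
    have hph : ph = false := hx (d, ph) List.mem_cons_self
    subst hph
    refine ⟨fun h => by simp at h, ?_⟩
    show pvWFs opts (xs ++ ys) (fun k => S k ∨ k = d)
    refine ih (fun k => S k ∨ k = d) (fun e he => hx e (List.mem_cons_of_mem _ he)) ?_
    apply pvWFs_mono opts ys _ _ _ hw
    intro k hk
    rcases hk with hs | ⟨e, he, hek⟩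
    · exact Or.inl (Or.inl hs)
    · rcases List.mem_cons.mp he with rfl | he'
      · exact Or.inl (Or.inr hek.symm)
      · exact Or.inr ⟨e, he', hek⟩

theorem pv_wt_pos (K : Nat) (memo : PySem.Dict Int Int) (e : Int × Bool) : 1 ≤ pvWt K memo e := by
  unfold pvWt; split_ifs <;> omega

theorem pv_dec_skip (K : Nat) (memo : PySem.Dict Int Int) (e : Int × Bool) (rest : List (Int × Bool)) :
    pvMeasure K memo rest < pvMeasure K memo (e :: rest) := by
  have := pv_wt_pos K memo e
  unfold pvMeasure
  rw [List.map_cons, List.sum_cons]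
  omega

theorem pv_filter_len_mono {α : Type} (l : List α) (p q : α → Bool)
    (h : ∀ x ∈ l, p x = true → q x = true) :
    (l.filter p).length ≤ (l.filter q).length := by
  induction l with
  | nil => simp
  | cons x l ih =>
    have ih' := ih (fun y hy => h y (List.mem_cons_of_mem _ hy))
    by_cases hp : p x = true
    · rw [List.filter_cons_of_pos hp, List.filter_cons_of_pos (h x List.mem_cons_self hp)]
      simpa using ih'
    · rw [List.filter_cons_of_neg (by simpa using hp)]
      refine le_trans ih' ?_
      cases hq : q x
      · rw [List.filter_cons_of_neg (by simp [hq])]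
      · rw [List.filter_cons_of_pos hq]; simp
      
theorem pv_uncomp_insert_le (memo : PySem.Dict Int Int) (i v j : Int) :
    pvUncomp (memo.insert i v) j ≤ pvUncomp memo j := by
  unfold pvUncomp
  apply pv_filter_len_mono
  intro k _ hk
  simp only [Option.isNone_iff_eq_none] at hk ⊢
  by_cases hki : (k : Int) = i
  · rw [hki, PySem.Dict.get?_insert_self] at hk; exact absurd hk (by simp)
  · rwa [PySem.Dict.get?_insert_of_ne _ _ hki] at hk

theorem pv_wt_insert_le (K : Nat) (hK : 1 ≤ K) (memo : PySem.Dict Int Int) (i v : Int) (e : Int × Bool) :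
    pvWt K (memo.insert i v) e ≤ pvWt K memo e := by
  unfold pvWt
  have hle : K ^ pvUncomp (memo.insert i v) e.1 ≤ K ^ pvUncomp memo e.1 :=
    Nat.pow_le_pow_right hK (pv_uncomp_insert_le memo i v e.1)
  have hpos : 1 ≤ K ^ pvUncomp memo e.1 := Nat.one_le_pow _ _ hK
  by_cases hs : (PySem.Dict.get? memo e.1).isSome
  · have hs' : (PySem.Dict.get? (memo.insert i v) e.1).isSome := by
      by_cases hei : e.1 = i
      · rw [hei, PySem.Dict.get?_insert_self]; simp
      · rwa [PySem.Dict.get?_insert_of_ne _ _ hei]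
    rw [if_pos hs, if_pos hs']
  · rw [if_neg hs]
    split_ifs <;> omega

theorem pv_dec_compute (K : Nat) (hK : 1 ≤ K) (memo : PySem.Dict Int Int) (i v : Int)
    (rest : List (Int × Bool)) :
    pvMeasure K (memo.insert i v) rest < pvMeasure K memo ((i, true) :: rest) := by
  have h1 : pvMeasure K (memo.insert i v) rest ≤ pvMeasure K memo rest := by
    unfold pvMeasure
    exact List.sum_le_sum (fun e _ => pv_wt_insert_le K hK memo i v e)
  have h2 := pv_dec_skip K memo (i, true) rest
  omega

theorem pv_uncomp_lt (memo : PySem.Dict Int Int) (d i : Int) (hd : 0 ≤ d) (hdi : d < i)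
    (hi : PySem.Dict.get? memo i = none) : pvUncomp memo d < pvUncomp memo i := by
  unfold pvUncomp
  have hrange : (i + 1).toNat = i.toNat + 1 := by omega
  rw [hrange, List.range_succ, List.filter_append]
  have hsing : (List.filter (fun k : Nat => (PySem.Dict.get? memo (k : Int)).isNone) [i.toNat]).length = 1 := by
    have hcast : ((i.toNat : Int)) = i := by omega
    simp [List.filter, hcast, hi]
  rw [List.length_append, hsing]
  have hmono : (List.filter (fun k : Nat => (PySem.Dict.get? memo (k : Int)).isNone) (List.range (d + 1).toNat)).length ≤
      (List.filter (fun k : Nat => (PySem.Dict.get? memo (k : Int)).isNone) (List.range i.toNat)).length := by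
    have hsub : (List.range (d + 1).toNat).Sublist (List.range i.toNat) := by
      rw [List.range_sublist]
      omega
    exact (hsub.filter _).length_le
  omega

theorem pv_uncomp_pos (memo : PySem.Dict Int Int) (i : Int) (hi0 : 0 ≤ i)
    (hi : PySem.Dict.get? memo i = none) : 1 ≤ pvUncomp memo i := by
  unfold pvUncomp
  have hrange : (i + 1).toNat = i.toNat + 1 := by omega
  rw [hrange, List.range_succ, List.filter_append, List.length_append]
  have : ((i.toNat : Int)) = i := by omega
  simp [List.filter, this, hi]

theorem pv_dec_pend (opts : List (Int × Int)) (memo : PySem.Dict Int Int) (i : Int)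
    (rest : List (Int × Bool)) (hi : PySem.Dict.get? memo i = none) :
    pvMeasure (3 * opts.length + 4) memo ((pvMissing opts memo i).reverse ++ (i, true) :: rest) <
      pvMeasure (3 * opts.length + 4) memo ((i, false) :: rest) := by
  set K := 3 * opts.length + 4 with hKdef
  have hK : 1 ≤ K := by omega
  set u := pvUncomp memo i with hu
  have hwtT : pvWt K memo (i, true) = K ^ u + 1 := by
    unfold pvWt; rw [if_neg (by simp [hi])]; rfl
  have hwtF : pvWt K memo (i, false) = 2 * K ^ u + 1 := by
    unfold pvWt; rw [if_neg (by simp [hi])]; rfl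
  have hsum : pvMeasure K memo ((pvMissing opts memo i).reverse ++ (i, true) :: rest) =
      ((pvMissing opts memo i).map (pvWt K memo)).sum + (K ^ u + 1) + pvMeasure K memo rest := by
    unfold pvMeasure
    rw [List.map_append, List.sum_append, List.map_cons, List.sum_cons, List.map_reverse,
      List.sum_reverse, hwtT]
    ring
  have hcons : pvMeasure K memo ((i, false) :: rest) = (2 * K ^ u + 1) + pvMeasure K memo rest := by
    unfold pvMeasure
    rw [List.map_cons, List.sum_cons, hwtF]
  rw [hsum, hcons]
  have hpow1 : 1 ≤ K ^ u := Nat.one_le_pow _ _ hK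
  cases hM : pvMissing opts memo i with
  | nil =>
    simp only [List.map_nil, List.sum_nil]
    omega
  | cons e' l' =>
    -- the missing list is nonempty, so some option has 1 ≤ c ≤ i: i ≥ 1 and u ≥ 1
    have hmem : e' ∈ e' :: l' := List.mem_cons_self
    have hprop : ∀ e ∈ e' :: l', ∃ d : Int, e = (d, false) ∧ 0 ≤ d ∧ d < i ∧
        PySem.Dict.get? memo d = none := by
      intro e he
      rw [← hM] at he
      unfold pvMissing at he
      rw [List.mem_filterMap] at he
      obtain ⟨dc, _, hdc⟩ := he
      by_cases hcond : 1 ≤ dc.2 ∧ dc.2 ≤ i ∧ PySem.Dict.get? memo (i - dc.2) = none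
      · rw [if_pos hcond] at hdc
        injection hdc with hdc
        exact ⟨i - dc.2, hdc.symm, by omega, by omega, hcond.2.2⟩
      · rw [if_neg hcond] at hdc; exact absurd hdc (by simp)
    have hi0 : 0 ≤ i := by
      obtain ⟨d, _, hd0, hdi, _⟩ := hprop e' hmem
      omega
    have hu1 : 1 ≤ u := pv_uncomp_pos memo i hi0 hi
    -- every missing entry weighs at most 2*K^(u-1)+1
    have hbound : ∀ w ∈ (e' :: l').map (pvWt K memo), w ≤ 2 * K ^ (u - 1) + 1 := by
      intro w hw
      rw [List.mem_map] at hw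
      obtain ⟨e, he, rfl⟩ := hw
      obtain ⟨d, rfl, hd0, hdi, hdnone⟩ := hprop e he
      have : pvWt K memo (d, false) = 2 * K ^ pvUncomp memo d + 1 := by
        unfold pvWt; rw [if_neg (by simp [hdnone])]; rfl
      rw [this]
      have hult : pvUncomp memo d < u := pv_uncomp_lt memo d i hd0 hdi hi
      have : K ^ pvUncomp memo d ≤ K ^ (u - 1) := Nat.pow_le_pow_right hK (by omega)
      omega
    have hlen : (e' :: l').length ≤ opts.length := by
      rw [← hM]
      unfold pvMissing
      exact List.length_filterMap_le _ _
    have hsumle : ((e' :: l').map (pvWt K memo)).sum ≤ opts.length * (2 * K ^ (u - 1) + 1) := by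
      refine le_trans (List.sum_le_card_nsmul _ _ hbound) ?_
      rw [List.length_map, smul_eq_mul]
      exact Nat.mul_le_mul_right _ hlen
    -- arithmetic: L*(2x+1) + K^u + 1 < 2*K^u + 1 with K = 3L+4, x = K^(u-1), K^u = K*x
    have hpowu : K ^ u = K * K ^ (u - 1) := by
      conv_lhs => rw [show u = (u - 1) + 1 by omega]
      rw [pow_succ]
      ring
    have hx1 : 1 ≤ K ^ (u - 1) := Nat.one_le_pow _ _ hK
    set L := opts.length
    set x := K ^ (u - 1)
    have : L * (2 * x + 1) + K * x + 1 < 2 * (K * x) + 1 := by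
      have hKx : K = 3 * L + 4 := rfl
      nlinarith [hx1]
    omega


-- the compute step produces pvFI i whenever every valid dep is present and correct
theorem pv_best_eq (opts : List (Int × Int)) (hc : ∀ dc ∈ opts, 1 ≤ dc.2)
    (memo : PySem.Dict Int Int) (i : Int)
    (hInv : ∀ k v, PySem.Dict.get? memo k = some v → v = pvFI opts k)
    (hdeps : ∀ dc ∈ opts, 1 ≤ dc.2 → dc.2 ≤ i → (PySem.Dict.get? memo (i - dc.2)).isSome)
    (hne0 : i ≠ 0) :
    pvBest opts memo i = pvFI opts i := by
  rcases (show i < 0 ∨ 1 ≤ i by omega) with hneg | hpos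
  · unfold pvBest
    rw [PySem.List.foldl_congr_mem opts _ (fun acc _ => acc) _
      (fun acc dc hdc => by
        rw [if_neg]
        rintro ⟨h1, h2⟩
        omega)]
    rw [PySem.List.foldl_ignore]
    unfold pvFI
    rw [if_neg (by omega)]
  · obtain ⟨k, rfl⟩ : ∃ k : Nat, i = (k : Int) + 1 := ⟨(i - 1).toNat, by omega⟩
    unfold pvBest
    rw [PySem.List.foldl_congr_mem opts _ (pvStepAcc (pvTbl opts k)) _
      (fun acc dc hdc => by
        have hc1 : 1 ≤ dc.2 := hc dc hdc
        have hTlen : ((pvTbl opts k).length : Int) = (k : Int) + 1 := by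
          rw [pv_length_tbl]; push_cast; ring
        unfold pvStepAcc
        rw [hTlen]
        by_cases hcle : dc.2 ≤ (k : Int) + 1
        · rw [if_pos ⟨hc1, hcle⟩]
          obtain ⟨v, hv⟩ := Option.isSome_iff_exists.mp (hdeps dc hdc hc1 hcle)
          have hvF : v = pvFI opts ((k : Int) + 1 - dc.2) := hInv _ _ hv
          have hXF : PySem.Dict.getD memo ((k : Int) + 1 - dc.2) (-1) =
              pvF opts ((k : Int) + 1 - dc.2).toNat := by
            rw [PySem.Dict.getD_eq_get?_getD, hv, show (some v).getD (-1) = v from rfl, hvF]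
            unfold pvFI
            rw [if_pos (by omega)]
          have hTd : (pvTbl opts k).getD ((k : Int) + 1 - dc.2).toNat 0 =
              pvF opts ((k : Int) + 1 - dc.2).toNat :=
            pvF_prefix opts k _ (by omega)
          rw [hXF, hTd]
          by_cases hne : pvF opts ((k : Int) + 1 - dc.2).toNat ≠ -1
          · rw [if_pos hne, if_pos ⟨hcle, hne⟩]
          · rw [if_neg hne, if_neg (by tauto)]
        · rw [if_neg (by tauto), if_neg (by tauto)])]
    have hcell : opts.foldl (pvStepAcc (pvTbl opts k)) (-1) = pvF opts (k + 1) := by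
      unfold pvF
      rw [show pvTbl opts (k + 1) =
          pvTbl opts k ++ [opts.foldl (pvStepAcc (pvTbl opts k)) (-1)] from rfl,
        List.getD_append_right _ _ _ _ (by rw [pv_length_tbl]), pv_length_tbl]
      simp
    rw [hcell]
    unfold pvFI
    rw [if_pos (by omega), show ((k : Int) + 1).toNat = k + 1 by omega]

theorem pvLoopF_main (opts : List (Int × Int)) (hc : ∀ dc ∈ opts, 1 ≤ dc.2)
    (fuel : Nat) :
    ∀ (stack : List (Int × Bool)) (memo : PySem.Dict Int Int),
    pvMeasure (3 * opts.length + 4) memo stack < fuel →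
    pvInv opts memo → pvWFs opts stack (fun k => (PySem.Dict.get? memo k).isSome) →
    pvInv opts (pvLoopF opts fuel stack memo) ∧
    (∀ k, (PySem.Dict.get? memo k).isSome →
      (PySem.Dict.get? (pvLoopF opts fuel stack memo) k).isSome) ∧
    (∀ e ∈ stack, (PySem.Dict.get? (pvLoopF opts fuel stack memo) e.1).isSome) := by
  induction fuel with
  | zero =>
    intro stack memo hlt _ _
    omega
  | succ fuel ih =>
    intro stack memo hlt hInv hWF
    match stack with
    | [] =>
      rw [pvLoopF]
      exact ⟨hInv, fun k h => h, by simp⟩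
    | (i, exp) :: rest =>
      rw [pvLoopF]
      by_cases h1 : (PySem.Dict.get? memo i).isSome
      · rw [if_pos h1]
        obtain ⟨-, h2⟩ := hWF
        have hWF' : pvWFs opts rest (fun k => (PySem.Dict.get? memo k).isSome) :=
          pvWFs_mono opts rest _ _ (fun k hk => hk.elim id (fun he => he ▸ h1)) h2
        have hlt' : pvMeasure (3 * opts.length + 4) memo rest < fuel := by
          have := pv_dec_skip (3 * opts.length + 4) memo (i, exp) rest
          omega
        obtain ⟨rInv, rMono, rMem⟩ := ih rest memo hlt' hInv hWF'
        refine ⟨rInv, rMono, ?_⟩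
        intro e he
        rcases List.mem_cons.mp he with rfl | he'
        · exact rMono i h1
        · exact rMem e he'
      · rw [if_neg h1]
        cases exp with
        | true =>
          rw [if_pos rfl]
          obtain ⟨hWF1, hWF2⟩ := hWF
          have hdeps : ∀ dc ∈ opts, 1 ≤ dc.2 → dc.2 ≤ i →
              (PySem.Dict.get? memo (i - dc.2)).isSome := hWF1 rfl
          have hne0 : i ≠ 0 := by
            rintro rfl
            exact h1 hInv.1
          have hval : pvBest opts memo i = pvFI opts i :=
            pv_best_eq opts hc memo i hInv.2 hdeps hne0
          have hpres : ∀ k, (PySem.Dict.get? memo k).isSome →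
              (PySem.Dict.get? (memo.insert i (pvBest opts memo i)) k).isSome := by
            intro k hk
            by_cases hki : k = i
            · rw [hki, PySem.Dict.get?_insert_self]; simp
            · rwa [PySem.Dict.get?_insert_of_ne _ _ hki]
          have hInv' : pvInv opts (memo.insert i (pvBest opts memo i)) := by
            refine ⟨hpres 0 hInv.1, ?_⟩
            intro k v hkv
            by_cases hki : k = i
            · subst hki
              rw [PySem.Dict.get?_insert_self] at hkv
              injection hkv with hkv
              rw [← hkv, hval]
            · rw [PySem.Dict.get?_insert_of_ne _ _ hki] at hkv
              exact hInv.2 k v hkv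
          have hWF' : pvWFs opts rest
              (fun k => (PySem.Dict.get? (memo.insert i (pvBest opts memo i)) k).isSome) := by
            apply pvWFs_mono opts rest _ _ _ hWF2
            intro k hk
            rcases hk with hs | rfl
            · exact hpres k hs
            · rw [PySem.Dict.get?_insert_self]; simp
          have hlt' : pvMeasure (3 * opts.length + 4)
              (memo.insert i (pvBest opts memo i)) rest < fuel := by
            have := pv_dec_compute (3 * opts.length + 4) (by omega) memo i
              (pvBest opts memo i) rest
            omega
          obtain ⟨rInv, rMono, rMem⟩ := ih rest _ hlt' hInv' hWF'
          refine ⟨rInv, fun k hk => rMono k (hpres k hk), ?_⟩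
          intro e he
          rcases List.mem_cons.mp he with rfl | he'
          · exact rMono i (by rw [PySem.Dict.get?_insert_self]; simp)
          · exact rMem e he'
        | false =>
          rw [if_neg (by simp)]
          obtain ⟨-, hWF2⟩ := hWF
          have hWFns : pvWFs opts ((pvMissing opts memo i).reverse ++ (i, true) :: rest)
              (fun k => (PySem.Dict.get? memo k).isSome) := by
            apply pvWFs_append_false
            · intro e he
              rw [List.mem_reverse] at he
              unfold pvMissing at he
              rw [List.mem_filterMap] at he
              obtain ⟨dc, -, hdc⟩ := he
              split at hdc
              · injection hdc with hdc; rw [← hdc]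
              · exact absurd hdc (by simp)
            · refine ⟨?_, ?_⟩
              · intro _ dc hdc hc1 hc2
                by_cases hp : (PySem.Dict.get? memo (i - dc.2)).isSome
                · exact Or.inl hp
                · refine Or.inr ⟨(i - dc.2, false), ?_, rfl⟩
                  rw [List.mem_reverse]
                  unfold pvMissing
                  rw [List.mem_filterMap]
                  exact ⟨dc, hdc, by
                    rw [if_pos ⟨hc1, hc2, Option.not_isSome_iff_eq_none.mp hp⟩]⟩
              · apply pvWFs_mono opts rest _ _ _ hWF2
                intro k hk
                rcases hk with hs | rfl
                · exact Or.inl (Or.inl hs)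
                · exact Or.inr rfl
          have hlt' : pvMeasure (3 * opts.length + 4) memo
              ((pvMissing opts memo i).reverse ++ (i, true) :: rest) < fuel := by
            have := pv_dec_pend opts memo i rest (Option.not_isSome_iff_eq_none.mp h1)
            omega
          obtain ⟨rInv, rMono, rMem⟩ := ih _ memo hlt' hInv hWFns
          refine ⟨rInv, rMono, ?_⟩
          intro e he
          rcases List.mem_cons.mp he with rfl | he'
          · exact rMem (i, true) (by simp)
          · exact rMem e (by simp [he'])

theorem pv_solve_alt_eq (n m : Int) (a : List (Int × Int)) (h : Pre_solve n m a) :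
    solve_alt n m a = pvF (pvOpts m a) n.toNat := by
  obtain ⟨hn, hm, hcost⟩ := h
  have hopts : ∀ dc ∈ pvOpts m a, 1 ≤ dc.2 := hcost
  show PySem.Dict.getD
      (pvLoopF ((PySem.List.pyRange 0 m 1).map (fun j => PySem.List.pyGetD a j (0, 0)))
        (pvMeasure (3 * ((PySem.List.pyRange 0 m 1).map (fun j => PySem.List.pyGetD a j (0, 0))).length + 4)
          (PySem.Dict.ofList [((0 : Int), (0 : Int))]) [(n, false)] + 1)
        [(n, false)] (PySem.Dict.ofList [((0 : Int), (0 : Int))])) n (-1)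
      = pvF (pvOpts m a) n.toNat
  rw [pv_opts_map m a hm]
  have hmemo0 : PySem.Dict.ofList [((0 : Int), (0 : Int))] =
      PySem.Dict.empty.insert 0 0 := rfl
  have hInv0 : pvInv (pvOpts m a) (PySem.Dict.ofList [((0 : Int), (0 : Int))]) := by
    rw [hmemo0]
    refine ⟨by rw [PySem.Dict.get?_insert_self]; simp, ?_⟩
    intro k v hkv
    by_cases hk0 : k = 0
    · subst hk0
      rw [PySem.Dict.get?_insert_self] at hkv
      injection hkv with hkv
      rw [← hkv]
      rfl
    · rw [PySem.Dict.get?_insert_of_ne _ _ hk0, PySem.Dict.get?_empty] at hkv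
      exact absurd hkv (by simp)
  have hWF0 : pvWFs (pvOpts m a) [(n, false)]
      (fun k => (PySem.Dict.get? (PySem.Dict.ofList [((0 : Int), (0 : Int))]) k).isSome) :=
    ⟨fun h => by simp at h, trivial⟩
  obtain ⟨rInv, -, rMem⟩ := pvLoopF_main (pvOpts m a) hopts
    (pvMeasure (3 * (pvOpts m a).length + 4)
      (PySem.Dict.ofList [((0 : Int), (0 : Int))]) [(n, false)] + 1)
    [(n, false)] (PySem.Dict.ofList [((0 : Int), (0 : Int))]) (by omega) hInv0 hWF0
  obtain ⟨v, hv⟩ := Option.isSome_iff_exists.mp (rMem (n, false) (by simp))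
  have hvF : v = pvFI (pvOpts m a) n := rInv.2 n v hv
  rw [PySem.Dict.getD_eq_get?_getD, hv]
  rw [show (some v).getD (-1) = v from rfl, hvF]
  unfold pvFI
  rw [if_pos hn]

-- ===== VERDICT (by name: the statement is the Claim_ definition above) =====
theorem solve_spec : Claim_equal_solve := by
  intro n m a _ hpre
  unfold Spec_solve
  rw [pv_solve_eq n m a hpre, pv_solve_alt_eq n m a hpre]
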